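-- pv_equiv track=rewrite | github.com/toulbar2/toulbar2 | cpd-tests/bilevel-generator.py | generatesameAA
-- ===== SOURCE A (Python) =====
-- import itertools
--
-- def generatesameAA(l1, l2):
--     ltuples = []
--     aas = list(set(v[0] for v in l1).intersection(set(v[0] for v in l2)))
--     aas.sort()
--     for aa in aas:
--         lrot1 = [i for i, x in enumerate(l1) if x[0] == aa]
--         lrot2 = [i for i, x in enumerate(l2) if x[0] == aa]
--         for val1, val2 in itertools.product(lrot1, lrot2):
--             ltuples.append(val1)
--             ltuples.append(val2)
--             ltuples.append(0)
--     return ltuples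
-- ===== SOURCE B (Python) =====
-- def generatesameAA(l1, l2):
--     d1 = {}
--     for i, x in enumerate(l1):
--         d1.setdefault(x[0], []).append(i)
--     d2 = {}
--     for j, x in enumerate(l2):
--         d2.setdefault(x[0], []).append(j)
--     out = []
--     for aa in sorted(d1.keys() & d2.keys()):
--         for i in d1[aa]:
--             for j in d2[aa]:
--                 out += [i, j, 0]
--     return out
-- ===== Notes on version B (the rewrite author's own statement) =====
-- stated objective: alternative
-- what changed: B builds index-list dicts keyed by amino acid in one pass over each input list and then iterates the sorted shared keys, instead of A's full rescan of both lists for every shared key.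
import Mathlib
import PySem

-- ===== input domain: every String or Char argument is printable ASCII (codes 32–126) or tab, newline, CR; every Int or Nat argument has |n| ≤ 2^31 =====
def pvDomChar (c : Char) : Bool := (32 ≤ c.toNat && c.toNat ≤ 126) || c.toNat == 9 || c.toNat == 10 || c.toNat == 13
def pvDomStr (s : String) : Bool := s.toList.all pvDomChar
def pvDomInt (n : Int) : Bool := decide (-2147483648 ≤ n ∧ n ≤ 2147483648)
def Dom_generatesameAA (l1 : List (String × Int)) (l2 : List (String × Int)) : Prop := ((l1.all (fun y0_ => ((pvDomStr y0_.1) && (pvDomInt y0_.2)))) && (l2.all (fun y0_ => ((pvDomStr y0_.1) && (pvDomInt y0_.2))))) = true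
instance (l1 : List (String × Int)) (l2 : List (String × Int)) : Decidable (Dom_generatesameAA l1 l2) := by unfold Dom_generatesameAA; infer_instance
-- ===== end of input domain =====

-- B groups indices by amino acid into two dicts in one pass each and walks the sorted shared
-- keys, instead of A's rescan of both lists for every shared key (a different traversal of the
-- inputs; same output).

-- ===== PORT A =====
def generatesameAA (l1 : List (String × Int)) (l2 : List (String × Int)) : List Int :=
  let ltuples : List Int := []
  let aas := PySem.List.sorted
    (PySem.Set.inter (PySem.Set.ofList (l1.map (fun v => v.1))) (PySem.Set.ofList (l2.map (fun v => v.1))))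
    (fun x => x) false
  aas.foldl (fun acc aa =>
    let lrot1 := ((PySem.List.enumerate l1).filter (fun p => p.2.1 == aa)).map (fun p => p.1)
    let lrot2 := ((PySem.List.enumerate l2).filter (fun p => p.2.1 == aa)).map (fun p => p.1)
    (lrot1.product lrot2).foldl (fun acc2 pr => ((acc2 ++ [pr.1]) ++ [pr.2]) ++ [0]) acc) ltuples

-- ===== PORT B =====
def generatesameAA_alt (l1 : List (String × Int)) (l2 : List (String × Int)) : List Int :=
  let d1 := (PySem.List.enumerate l1).foldl
    (fun d p => d.modify p.2.1 ([] : List Int) (fun l => l ++ [p.1])) PySem.Dict.empty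
  let d2 := (PySem.List.enumerate l2).foldl
    (fun d p => d.modify p.2.1 ([] : List Int) (fun l => l ++ [p.1])) PySem.Dict.empty
  let keys := PySem.List.sorted (PySem.Set.inter d1.keys d2.keys) (fun x => x) false
  keys.foldl (fun out aa =>
    (d1.getD aa []).foldl (fun out i =>
      (d2.getD aa []).foldl (fun out j => out ++ [i, j, 0]) out) out) []

-- ===== PRECONDITION & SPEC =====
def Spec_generatesameAA (l1 : List (String × Int)) (l2 : List (String × Int)) (out : List Int) : Prop := out = generatesameAA_alt l1 l2
instance (l1 : List (String × Int)) (l2 : List (String × Int)) (out : List Int) : Decidable (Spec_generatesameAA l1 l2 out) := by unfold Spec_generatesameAA; infer_instance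

-- ===== CLAIM (what is proved, stated in full; the proofs are below) =====
def Claim_equal_generatesameAA : Prop := ∀ (l1 : List (String × Int)) (l2 : List (String × Int)), Dom_generatesameAA l1 l2 → Spec_generatesameAA l1 l2 (generatesameAA l1 l2)

-- ===== LEMMAS AND PROOFS =====


theorem keys_group (l : List (String × Int)) :
    ((PySem.List.enumerate l).foldl
      (fun d p => d.modify p.2.1 ([] : List Int) (fun v => v ++ [p.1])) PySem.Dict.empty).keys
    = PySem.Set.ofList (l.map (fun v => v.1)) := by
  rw [PySem.Dict.keys_foldl_modify_key (PySem.List.enumerate l) (fun p => p.2.1) ([] : List Int) (fun _ p v => v ++ [p.1]) PySem.Dict.empty]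
  have h : (PySem.List.enumerate l).map (fun p => p.2.1)
      = l.map (fun v => v.1) := by
    have := PySem.List.map_snd_enumerate l 0
    calc (PySem.List.enumerate l).map (fun p => p.2.1)
        = ((PySem.List.enumerate l).map (fun p => p.2)).map (fun x => x.1) := by rw [List.map_map]; rfl
      _ = l.map (fun v => v.1) := by rw [this]
  rw [h]
  rfl

theorem getD_group (l : List (String × Int)) (aa : String) :
    ((PySem.List.enumerate l).foldl
      (fun d p => d.modify p.2.1 ([] : List Int) (fun v => v ++ [p.1])) PySem.Dict.empty).getD aa []
    = ((PySem.List.enumerate l).filter (fun p => p.2.1 == aa)).map (fun p => p.1) := by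
  have h : (PySem.List.enumerate l).foldl
      (fun d p => d.modify p.2.1 ([] : List Int) (fun v => v ++ [p.1])) PySem.Dict.empty
      = ((PySem.List.enumerate l).map (fun p => (p.2.1, p.1))).foldl
      (fun d q => d.modify q.1 ([] : List Int) (fun v => v ++ [q.2])) PySem.Dict.empty := by
    rw [List.foldl_map]
  rw [h, PySem.Dict.getD_foldl_modify_append]
  simp [List.filter_map, Function.comp_def]

theorem inner_eq (xs ys : List Int) (acc : List Int) :
    (xs.product ys).foldl (fun acc2 pr => ((acc2 ++ [pr.1]) ++ [pr.2]) ++ [0]) acc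
    = xs.foldl (fun out i => ys.foldl (fun out j => out ++ [i, j, 0]) out) acc := by
  induction xs generalizing acc with
  | nil => simp [List.product]
  | cons x xs ih =>
    simp only [List.product, List.flatMap_cons, List.foldl_append, List.foldl_cons] at *
    rw [← ih]
    congr 1
    rw [List.foldl_map]
    apply PySem.List.foldl_congr_mem
    intro a j _
    simp

-- ===== VERDICT (by name: the statement is the Claim_ definition above) =====
theorem generatesameAA_spec : Claim_equal_generatesameAA := by
  intro l1 l2 _
  unfold Spec_generatesameAA generatesameAA generatesameAA_alt
  simp only [keys_group, getD_group]
  exact PySem.List.foldl_congr_mem _ _ _ _ (fun acc aa _ => inner_eq _ _ _)
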